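-- pv_equiv track=rewrite | github.com/LupaDevStudio/Linconym | tools/linconym.py | count_different_letters
-- ===== SOURCE A (Python) =====
-- def count_different_letters(word1: str, word2: str) -> int:
--     """
--     Count the number of different letters between two words.
--
--     Parameters
--     ----------
--     word1 : str
--         First word.
--     word2 : str
--         Second word.
--
--     Returns
--     -------
--     int
--         Number of different letters.
--     """
--
--     # Initialise the number of different letters
--     nb_different_letters = 0
--     used_letters = [False] * len(word2)
--
--     # Iterate over the letters of the first word
--     for letter in word1:
--         valid_letter_bool = False
--         for i, check_letter in enumerate(word2):
--             if check_letter == letter and used_letters[i] is False: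
--                 used_letters[i] = True
--                 valid_letter_bool = True
--                 break
--         if valid_letter_bool is False:
--             nb_different_letters += 1
--
--     return nb_different_letters
-- ===== SOURCE B (Python) =====
-- def count_different_letters(word1: str, word2: str) -> int:
--     counts = {}
--     for ch in word2:
--         counts[ch] = counts.get(ch, 0) + 1
--     nb = 0
--     for ch in word1:
--         c = counts.get(ch, 0)
--         if c > 0:
--             counts[ch] = c - 1
--         else:
--             nb += 1
--     return nb
-- ===== Notes on version B (the rewrite author's own statement) =====
-- stated objective: faster
-- what changed: Replaces the nested scan over word2 with a used-flags array by a single counting pass: build a multiplicity dict of word2 once, then one pass over word1 decrementing counts, counting letters whose count is exhausted.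
import Mathlib
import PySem

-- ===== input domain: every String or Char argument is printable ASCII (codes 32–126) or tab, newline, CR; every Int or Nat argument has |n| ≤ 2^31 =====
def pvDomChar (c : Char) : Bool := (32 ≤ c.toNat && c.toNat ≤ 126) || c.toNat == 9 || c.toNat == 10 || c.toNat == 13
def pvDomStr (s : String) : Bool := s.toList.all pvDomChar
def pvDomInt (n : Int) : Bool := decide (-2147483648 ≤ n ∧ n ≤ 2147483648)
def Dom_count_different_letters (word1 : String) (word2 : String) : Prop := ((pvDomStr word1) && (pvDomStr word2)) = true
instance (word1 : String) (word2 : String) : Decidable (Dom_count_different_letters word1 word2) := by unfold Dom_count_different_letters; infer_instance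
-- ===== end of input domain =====

-- B replaces A's O(n*m) nested scan with used-flags by a one-pass multiplicity-dict count (objective: faster).

-- ===== PORT A =====
-- A's inner `for i, check_letter in enumerate(word2): … break`: returns the updated
-- used-flags list on a successful match (first unused equal letter), none otherwise.
def pvInnerA : List Char → List Bool → Char → Option (List Bool)
  | c :: cs, u :: us, letter =>
      if c == letter && u == false then some (true :: us)
      else match pvInnerA cs us letter with
           | some us' => some (u :: us')
           | none => none
  | _, _, _ => none

-- A's outer loop over word1, carrying used_letters and nb_different_letters.
def pvLoopA (w2 : List Char) : List Char → List Bool → Int → Int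
  | [], _, nb => nb
  | ch :: rest, used, nb =>
      match pvInnerA w2 used ch with
      | some used' => pvLoopA w2 rest used' nb
      | none => pvLoopA w2 rest used (nb + 1)

def count_different_letters (word1 : String) (word2 : String) : Int :=
  pvLoopA word2.toList word1.toList (List.replicate word2.toList.length false) 0

-- ===== PORT B =====
def count_different_letters_alt (word1 : String) (word2 : String) : Int :=
  let counts := word2.toList.foldl (fun d ch => d.insert ch (d.getD ch 0 + 1)) PySem.Dict.empty
  (word1.toList.foldl
    (fun (s : PySem.Dict Char Int × Int) ch =>
      let c := s.1.getD ch 0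
      if c > 0 then (s.1.insert ch (c - 1), s.2) else (s.1, s.2 + 1))
    (counts, 0)).2

-- ===== PRECONDITION & SPEC =====
def Spec_count_different_letters (word1 : String) (word2 : String) (out : Int) : Prop := out = count_different_letters_alt word1 word2
instance (word1 : String) (word2 : String) (out : Int) : Decidable (Spec_count_different_letters word1 word2 out) := by unfold Spec_count_different_letters; infer_instance

-- ===== CLAIM (what is proved, stated in full; the proofs are below) =====
def Claim_equal_count_different_letters : Prop := ∀ (word1 : String) (word2 : String), Dom_count_different_letters word1 word2 → Spec_count_different_letters word1 word2 (count_different_letters word1 word2)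

-- ===== LEMMAS AND PROOFS =====

-- number of still-unused positions of word2 holding character c
def pvAvail : List Char → List Bool → Char → Nat
  | c :: cs, u :: us, ch => (if c == ch && u == false then 1 else 0) + pvAvail cs us ch
  | _, _, _ => 0

lemma pvInnerA_none (w2 : List Char) : ∀ (used : List Bool) (ch : Char),
    used.length = w2.length → pvAvail w2 used ch = 0 → pvInnerA w2 used ch = none := by
  induction w2 with
  | nil => intro used ch hlen _; cases used with
    | nil => simp [pvInnerA]
    | cons u us => simp at hlen
  | cons c cs ih =>
    intro used ch hlen hav
    cases used with
    | nil => simp at hlen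
    | cons u us =>
      simp only [pvAvail] at hav
      by_cases hm : (c == ch && u == false) = true
      · rw [if_pos hm] at hav; exact absurd hav (by omega)
      · rw [if_neg hm] at hav
        simp only [pvInnerA]
        rw [if_neg hm, ih us ch (by simpa using hlen) (by omega)]

lemma pvInnerA_some (w2 : List Char) : ∀ (used : List Bool) (ch : Char),
    used.length = w2.length → 0 < pvAvail w2 used ch →
    ∃ us', pvInnerA w2 used ch = some us' ∧ us'.length = used.length ∧
      ∀ c, pvAvail w2 us' c = if c = ch then pvAvail w2 used ch - 1 else pvAvail w2 used c := by
  induction w2 with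
  | nil => intro used ch hlen hav; simp [pvAvail] at hav
  | cons c cs ih =>
    intro used ch hlen hav
    cases used with
    | nil => simp at hlen
    | cons u us =>
      by_cases hm : (c == ch && u == false) = true
      · obtain ⟨hc, hu⟩ := Bool.and_eq_true_iff.mp hm
        rw [beq_iff_eq] at hc hu
        subst hc; subst hu
        refine ⟨true :: us, by simp only [pvInnerA]; rw [if_pos hm], by simp, ?_⟩
        intro c'
        by_cases hc' : c' = c
        · subst hc'
          rw [if_pos rfl]
          simp only [pvAvail]
          rw [if_neg (by simp), if_pos (by simp)]
          omega
        · rw [if_neg hc']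
          simp only [pvAvail]
          have hne : (c == c') = false := by
            simp only [beq_eq_false_iff_ne, ne_eq]
            exact fun h => hc' h.symm
          rw [hne]
          simp
      · have hav' : 0 < pvAvail cs us ch := by
          simp only [pvAvail] at hav
          rw [if_neg hm] at hav
          omega
        obtain ⟨us', heq, hl, hav2⟩ := ih us ch (by simpa using hlen) hav'
        refine ⟨u :: us', by simp only [pvInnerA]; rw [if_neg hm, heq], by simpa using hl, ?_⟩
        intro c'
        have hthis := hav2 c'
        by_cases hc' : c' = ch
        · subst hc'
          rw [if_pos rfl] at hthis ⊢
          simp only [pvAvail]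
          rw [if_neg hm]
          omega
        · rw [if_neg hc'] at hthis ⊢
          simp only [pvAvail]
          rw [hthis]

lemma pvMain (w1 : List Char) : ∀ (w2 : List Char) (used : List Bool)
    (d : PySem.Dict Char Int) (nb : Int),
    used.length = w2.length →
    (∀ c, d.getD c 0 = (pvAvail w2 used c : Int)) →
    pvLoopA w2 w1 used nb =
      (w1.foldl
        (fun (s : PySem.Dict Char Int × Int) ch =>
          let c := s.1.getD ch 0
          if c > 0 then (s.1.insert ch (c - 1), s.2) else (s.1, s.2 + 1))
        (d, nb)).2 := by
  induction w1 with
  | nil => intro w2 used d nb _ _; simp [pvLoopA]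
  | cons ch rest ih =>
    intro w2 used d nb hlen hinv
    by_cases hpos : 0 < pvAvail w2 used ch
    · obtain ⟨us', heq, hl, hav⟩ := pvInnerA_some w2 used ch hlen hpos
      have hgd : d.getD ch 0 > 0 := by rw [hinv]; exact_mod_cast hpos
      simp only [pvLoopA, heq, List.foldl_cons, hgd, if_pos]
      refine ih w2 us' _ nb (hl.trans hlen) ?_
      intro c
      rw [PySem.Dict.getD_insert, hav c]
      by_cases hc : c = ch
      · subst hc
        rw [if_pos rfl, if_pos rfl, Nat.cast_sub (by omega), hinv]
        simp
      · rw [if_neg hc, if_neg hc, hinv]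
    · have hz : pvAvail w2 used ch = 0 := by omega
      have heq := pvInnerA_none w2 used ch hlen hz
      have hgd : ¬ d.getD ch 0 > 0 := by rw [hinv, hz]; simp
      simp only [pvLoopA, heq, List.foldl_cons, if_neg hgd]
      exact ih w2 used d (nb + 1) hlen hinv

lemma pvAvail_replicate (w2 : List Char) (c : Char) :
    pvAvail w2 (List.replicate w2.length false) c = w2.count c := by
  induction w2 with
  | nil => simp [pvAvail]
  | cons x xs ih =>
    simp only [List.length_cons, List.replicate_succ, pvAvail, List.count_cons, ih]
    by_cases h : (x == c) = true
    · simp [h]; omega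
    · simp [h]

-- ===== VERDICT (by name: the statement is the Claim_ definition above) =====
theorem count_different_letters_spec : Claim_equal_count_different_letters := by
  intro word1 word2 _
  unfold Spec_count_different_letters count_different_letters count_different_letters_alt
  rw [pvMain word1.toList word2.toList _ _ 0 (by simp)]
  intro c
  rw [PySem.Dict.foldl_insert_getD_add_one_eq_counter, PySem.Dict.getD_counter,
    pvAvail_replicate]
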